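-- pv_equiv track=rewrite | github.com/Laurentiu1802/InformationRetrieval_Project | myFunctions.py | build_word_frequency_dict
-- ===== SOURCE A (Python) =====
-- def build_word_frequency_dict(word_list, global_word_vector):
--     word_frequency = {}
--
--     for word in word_list:
--         if word in word_frequency:
--             word_frequency[word] += 1
--         else:
--             word_frequency[word] = 1
--
--     word_dict = {}
--     for word in word_frequency:
--         if word in global_word_vector:
--             word_index = global_word_vector.index(word)
--             word_dict[word_index] = word_frequency[word]
--
--     return word_dict
-- ===== SOURCE B (Python) =====
-- def build_word_frequency_dict(word_list, global_word_vector):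
--     # One accumulating pass: count occurrences directly under the global-vector index,
--     # fusing A's count phase and re-key-by-index phase into a single traversal.
--     word_dict = {}
--     for word in word_list:
--         if word in global_word_vector:
--             idx = global_word_vector.index(word)
--             word_dict[idx] = word_dict.get(idx, 0) + 1
--     return word_dict
-- ===== Notes on version B (the rewrite author's own statement) =====
-- stated objective: alternative
-- what changed: Replaces A's two sequential passes (build a word-frequency dict, then re-key the counts by global-vector index) with a single accumulating pass that counts directly into the index-keyed dict via dict.get, eliminating the intermediate word_frequency dict.
import Mathlib
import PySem

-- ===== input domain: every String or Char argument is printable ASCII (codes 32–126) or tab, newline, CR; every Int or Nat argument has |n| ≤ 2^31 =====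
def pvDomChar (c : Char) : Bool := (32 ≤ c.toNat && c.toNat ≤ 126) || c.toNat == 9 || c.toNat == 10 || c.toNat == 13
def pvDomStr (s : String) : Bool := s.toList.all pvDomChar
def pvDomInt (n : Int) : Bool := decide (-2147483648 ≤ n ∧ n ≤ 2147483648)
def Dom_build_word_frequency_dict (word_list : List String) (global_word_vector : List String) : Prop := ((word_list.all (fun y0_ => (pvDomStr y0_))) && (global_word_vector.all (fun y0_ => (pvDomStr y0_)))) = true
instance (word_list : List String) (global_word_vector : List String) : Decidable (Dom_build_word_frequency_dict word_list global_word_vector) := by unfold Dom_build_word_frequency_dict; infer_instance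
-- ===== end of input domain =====

-- B fuses A's two passes (count words, then re-key counts by global-vector index) into one
-- accumulating pass over word_list; objective: alternative decomposition, same result.


-- global_word_vector.index(word) as an Int (both Pythons compute it after a successful
-- membership test, so index? is some and the getD 0 default is never taken)
def pvKey (gwv : List String) (w : String) : Int :=
  (((PySem.List.index? gwv w).getD 0 : Nat) : Int)

-- ===== PORT A =====
-- A's first loop: build the word_frequency dict
def pvPhase1 (word_list : List String) : PySem.Dict String Int :=
  word_list.foldl (fun d word =>
    if d.contains word then d.modify word 0 (· + 1) else d.insert word 1)
    PySem.Dict.empty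

-- A's second loop: for each key of word_frequency, if it is in the vector, re-key its count
def build_word_frequency_dict (word_list : List String) (global_word_vector : List String) : List (Int × Int) :=
  ((pvPhase1 word_list).keys.foldl (fun d word =>
      if word ∈ global_word_vector then
        d.insert (pvKey global_word_vector word) ((pvPhase1 word_list).getD word 0)
      else d)
    (PySem.Dict.empty : PySem.Dict Int Int)).items

-- ===== PORT B =====
def build_word_frequency_dict_alt (word_list : List String) (global_word_vector : List String) : List (Int × Int) :=
  (word_list.foldl (fun d word =>
      if word ∈ global_word_vector then
        d.insert (pvKey global_word_vector word)
                 (d.getD (pvKey global_word_vector word) 0 + 1)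
      else d)
    (PySem.Dict.empty : PySem.Dict Int Int)).items

-- ===== PRECONDITION & SPEC =====
def Spec_build_word_frequency_dict (word_list : List String) (global_word_vector : List String) (out : List (Int × Int)) : Prop := out = build_word_frequency_dict_alt word_list global_word_vector
instance (word_list : List String) (global_word_vector : List String) (out : List (Int × Int)) : Decidable (Spec_build_word_frequency_dict word_list global_word_vector out) := by unfold Spec_build_word_frequency_dict; infer_instance

-- ===== CLAIM (what is proved, stated in full; the proofs are below) =====
def Claim_equal_build_word_frequency_dict : Prop := ∀ (word_list : List String) (global_word_vector : List String), Dom_build_word_frequency_dict word_list global_word_vector → Spec_build_word_frequency_dict word_list global_word_vector (build_word_frequency_dict word_list global_word_vector)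

-- ===== LEMMAS AND PROOFS =====

theorem pvKey_inj (gwv : List String) {a b : String} (ha : a ∈ gwv) (hb : b ∈ gwv)
    (h : pvKey gwv a = pvKey gwv b) : a = b := by
  obtain ⟨ka, hka⟩ := Option.isSome_iff_exists.mp ((PySem.List.index?_isSome_iff gwv a).mpr ha)
  obtain ⟨kb, hkb⟩ := Option.isSome_iff_exists.mp ((PySem.List.index?_isSome_iff gwv b).mpr hb)
  obtain ⟨hlta, hgeta, -⟩ := PySem.List.getElem_of_index?_eq_some hka
  obtain ⟨hltb, hgetb, -⟩ := PySem.List.getElem_of_index?_eq_some hkb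
  unfold pvKey at h
  rw [hka, hkb] at h
  simp only [Option.getD_some, Nat.cast_inj] at h
  subst h
  rw [← hgeta, ← hgetb]

theorem phase1_step (d : PySem.Dict String Int) (w : String) :
    (if d.contains w then d.modify w 0 (· + 1) else d.insert w 1) = d.modify w 0 (· + 1) := by
  by_cases h : d.contains w
  · simp [h]
  · have h' : d.contains w = false := by simpa using h
    simp [h, PySem.Dict.modify, PySem.Dict.getD_of_not_contains d 0 h']

theorem pvPhase1_eq_counter (wl : List String) : pvPhase1 wl = PySem.Dict.counter wl := by
  rw [PySem.Dict.counter_eq_foldl, pvPhase1]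
  exact PySem.List.foldl_congr_mem _ _ _ _ (fun acc x _ => phase1_step acc x)

-- set-of-list commutes with filter
theorem ofList_filter (p : String → Bool) (l : List String) :
    PySem.Set.ofList (l.filter p) = (PySem.Set.ofList l).filter p := by
  induction l using List.reverseRecOn with
  | nil => rfl
  | append_singleton l x ih =>
    rw [List.filter_append, PySem.Set.ofList_append_singleton]
    by_cases hx : p x = true
    · simp only [List.filter_singleton, hx, cond_true]
      rw [PySem.Set.ofList_append_singleton,
        PySem.Set.add_eq_ite, PySem.Set.add_eq_ite]
      by_cases hm : x ∈ PySem.Set.ofList l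
      · have hm' : x ∈ PySem.Set.ofList (l.filter p) := by
          rw [PySem.Set.mem_ofList] at hm ⊢
          exact List.mem_filter.mpr ⟨hm, hx⟩
        rw [if_pos hm', if_pos hm, ih]
      · have hm' : x ∉ PySem.Set.ofList (l.filter p) := by
          rw [PySem.Set.mem_ofList] at hm ⊢
          exact fun hc => hm (List.mem_filter.mp hc).1
        rw [if_neg hm', if_neg hm, ih, List.filter_append]
        simp [hx]
    · have hx' : p x = false := by simpa using hx
      simp only [List.filter_singleton, hx', cond_false, List.append_nil]
      rw [PySem.Set.add_eq_ite]
      by_cases hm : x ∈ PySem.Set.ofList l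
      · rw [if_pos hm]; exact ih
      · rw [if_neg hm, List.filter_append, ih]
        simp [hx']

-- B's loop over words all in gwv is a counter keyed by the (injective) pvKey
theorem keyed_counter (gwv l : List String) (hl : ∀ w ∈ l, w ∈ gwv) :
    (l.foldl (fun d w => d.insert (pvKey gwv w) (d.getD (pvKey gwv w) 0 + 1))
        (PySem.Dict.empty : PySem.Dict Int Int)).items
      = (PySem.Set.ofList l).map (fun w => (pvKey gwv w, (l.count w : Int))) := by
  induction l using List.reverseRecOn with
  | nil => rfl
  | append_singleton l x ih =>
    have hl' : ∀ w ∈ l, w ∈ gwv := fun w hw => hl w (List.mem_append_left _ hw)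
    have hx : x ∈ gwv := hl x (by simp)
    have ihl := ih hl'
    set d := l.foldl (fun d w => d.insert (pvKey gwv w) (d.getD (pvKey gwv w) 0 + 1))
        (PySem.Dict.empty : PySem.Dict Int Int) with hd
    have hkeys : d.keys = (PySem.Set.ofList l).map (pvKey gwv) := by
      show d.items.map (·.1) = _
      rw [ihl, List.map_map]; rfl
    have hnodup : d.keys.Nodup := by
      rw [hkeys]
      exact List.Nodup.map_on
        (fun a hma b hmb h => pvKey_inj gwv (hl' a ((PySem.Set.mem_ofList l a).mp hma))
          (hl' b ((PySem.Set.mem_ofList l b).mp hmb)) h)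
        (PySem.Set.nodup_ofList l)
    have hmemk : pvKey gwv x ∈ d.keys ↔ x ∈ l := by
      rw [hkeys]
      constructor
      · intro hm
        obtain ⟨w, hw, hwk⟩ := List.mem_map.mp hm
        have hwl := (PySem.Set.mem_ofList l w).mp hw
        rw [← pvKey_inj gwv (hl' w hwl) hx hwk]
        exact hwl
      · intro hm
        exact List.mem_map.mpr ⟨x, (PySem.Set.mem_ofList l x).mpr hm, rfl⟩
    rw [List.foldl_append, List.foldl_cons, List.foldl_nil, ← hd]
    by_cases hmem : x ∈ l
    · have hcont : d.contains (pvKey gwv x) = true := by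
        rw [PySem.Dict.contains_eq_decide_mem_keys]
        simpa using hmemk.mpr hmem
      have hget : d.getD (pvKey gwv x) 0 = (l.count x : Int) := by
        refine PySem.Dict.getD_of_mem_items d ?_ hnodup 0
        rw [ihl]
        exact List.mem_map.mpr ⟨x, (PySem.Set.mem_ofList l x).mpr hmem, rfl⟩
      rw [PySem.Dict.items_insert_of_contains d _ hcont, ihl, hget,
        PySem.Set.ofList_append_singleton,
        PySem.Set.add_of_mem ((PySem.Set.mem_ofList l x).mpr hmem),
        List.map_map]
      refine List.map_congr_left (fun w hw => ?_)
      have hwl : w ∈ l := (PySem.Set.mem_ofList l w).mp hw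
      by_cases hwx : w = x
      · subst hwx
        simp [List.count_append]
      · have hne : pvKey gwv w ≠ pvKey gwv x :=
          fun hc => hwx (pvKey_inj gwv (hl' w hwl) hx hc)
        simp [hne, List.count_append, Ne.symm hwx]
    · have hcont : d.contains (pvKey gwv x) = false := by
        rw [PySem.Dict.contains_eq_decide_mem_keys]
        simpa using fun hc => hmem (hmemk.mp hc)
      have hget : d.getD (pvKey gwv x) 0 = 0 := PySem.Dict.getD_of_not_contains d 0 hcont
      rw [PySem.Dict.items_insert_of_not_contains d _ hcont, ihl, hget,
        PySem.Set.ofList_append_singleton,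
        PySem.Set.add_of_not_mem (fun hc => hmem ((PySem.Set.mem_ofList l x).mp hc)),
        List.map_append]
      congr 1
      · refine List.map_congr_left (fun w hw => ?_)
        have hwx : w ≠ x := fun hc => hmem (hc ▸ (PySem.Set.mem_ofList l w).mp hw)
        simp [List.count_append, Ne.symm hwx]
      · have h0 : l.count x = 0 := List.count_eq_zero.mpr hmem
        simp [List.count_append, h0]

-- ===== VERDICT (by name: the statement is the Claim_ definition above) =====
theorem build_word_frequency_dict_spec : Claim_equal_build_word_frequency_dict := by
  intro wl gwv _
  unfold Spec_build_word_frequency_dict build_word_frequency_dict build_word_frequency_dict_alt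
  -- A side: the second loop over the counter's keys is a fold of fresh-key inserts
  simp only [PySem.List.foldl_ite_eq_foldl_filter]
  rw [pvPhase1_eq_counter, PySem.Dict.keys_counter]
  have hmemA : ∀ w ∈ (PySem.Set.ofList wl).filter (fun x => decide (x ∈ gwv)), w ∈ gwv :=
    fun w hw => by simpa using (List.mem_filter.mp hw).2
  have hmemB : ∀ w ∈ wl.filter (fun x => decide (x ∈ gwv)), w ∈ gwv :=
    fun w hw => by simpa using (List.mem_filter.mp hw).2
  rw [PySem.Dict.items_foldl_insert_fresh _ (pvKey gwv) _ _
        (fun a _ => by simp)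
        (List.Nodup.map_on
          (fun a hma b hmb h => pvKey_inj gwv (hmemA a hma) (hmemA b hmb) h)
          ((PySem.Set.nodup_ofList wl).filter _)),
      keyed_counter gwv _ hmemB,
      ofList_filter]
  refine List.map_congr_left (fun w hw => ?_)
  have hwg : w ∈ gwv := hmemA w hw
  have hwc : (wl.filter (fun x => decide (x ∈ gwv))).count w = wl.count w :=
    List.count_filter (by simpa using hwg)
  rw [hwc, PySem.Dict.getD_counter]
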